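-- pv_equiv track=rewrite | github.com/adriangalende/ejerciciosPython | groupedByCommas.py | group_by_commas
-- ===== SOURCE A (Python) =====
-- def group_by_commas(n):
--     posicion = 0
--     resultado = ""
--     for numero in (str(n))[::-1]:
--         if posicion%3 == 0 and posicion != 0:
--             resultado += ',' + numero
--         else:
--             resultado += numero
--
--         posicion += 1
--
--     return resultado[::-1]
-- ===== SOURCE B (Python) =====
-- def group_by_commas(n):
--     s = str(n)[::-1]
--     return ",".join(s[i:i+3] for i in range(0, len(s), 3))[::-1]
-- ===== Notes on version B (the rewrite author's own statement) =====
-- stated objective: idiomatic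
-- what changed: Replaces A's per-character position counter with conditional comma insertion by the idiomatic group-then-join pass: reverse str(n), slice it into chunks of three characters, join the chunks with a comma, reverse back.
import Mathlib
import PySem

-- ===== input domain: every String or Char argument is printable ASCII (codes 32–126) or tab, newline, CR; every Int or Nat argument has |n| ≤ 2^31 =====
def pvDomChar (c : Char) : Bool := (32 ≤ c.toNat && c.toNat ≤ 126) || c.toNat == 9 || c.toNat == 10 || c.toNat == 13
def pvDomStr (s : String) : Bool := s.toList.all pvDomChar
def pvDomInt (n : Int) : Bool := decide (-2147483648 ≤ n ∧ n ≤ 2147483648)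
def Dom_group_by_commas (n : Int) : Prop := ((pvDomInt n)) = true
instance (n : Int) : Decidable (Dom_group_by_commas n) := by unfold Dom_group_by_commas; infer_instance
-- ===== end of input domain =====

-- B replaces A's per-character position counter and conditional comma insertion by a
-- group-then-join pass over the reversed digit string (idiomatic; same cost).

-- ===== PORT A =====
def group_by_commas (n : Int) : String :=
  let rev := (PySem.List.slice? (PySem.Int.toChars n) none none (-1)).getD []
  let st := rev.foldl
    (fun (st : Int × List Char) numero =>
      if PySem.Int.mod st.1 3 == 0 && st.1 != 0 then (st.1 + 1, st.2 ++ [','] ++ [numero])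
      else (st.1 + 1, st.2 ++ [numero]))
    (0, [])
  String.ofList ((PySem.List.slice? st.2 none none (-1)).getD [])

-- ===== PORT B =====
def group_by_commas_alt (n : Int) : String :=
  let s := (PySem.List.slice? (PySem.Int.toChars n) none none (-1)).getD []
  let chunks := (PySem.List.pyRange 0 (PySem.List.len s) 3).map
    (fun i => PySem.List.slice s (some i) (some (i + 3)))
  String.ofList ((PySem.List.slice? (PySem.Chars.join [','] chunks) none none (-1)).getD [])

-- ===== PRECONDITION & SPEC =====
def Spec_group_by_commas (n : Int) (out : String) : Prop := out = group_by_commas_alt n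
instance (n : Int) (out : String) : Decidable (Spec_group_by_commas n out) := by unfold Spec_group_by_commas; infer_instance

-- ===== CLAIM (what is proved, stated in full; the proofs are below) =====
def Claim_equal_group_by_commas : Prop := ∀ (n : Int), Dom_group_by_commas n → Spec_group_by_commas n (group_by_commas n)

-- ===== LEMMAS AND PROOFS =====

-- A's loop body as a structural recursion on the remaining characters (position p).
def fA : List Char → Int → List Char
  | [], _ => []
  | c :: cs, p =>
    (if PySem.Int.mod p 3 == 0 && p != 0 then [',', c] else [c]) ++ fA cs (p + 1)

-- the chunks of length 3 that B's slicing produces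
def chunks3 : List Char → List (List Char)
  | [] => []
  | a :: rest => (a :: rest.take 2) :: chunks3 (rest.drop 2)
  termination_by l => l.length
  decreasing_by simp

theorem chunks3_nil : chunks3 [] = [] := by simp [chunks3]

theorem pvCondTrue (p : Int) (h3 : (3 : Int) ∣ p) (h0 : p ≠ 0) :
    (PySem.Int.mod p 3 == 0 && p != 0) = true := by
  simp only [Bool.and_eq_true, beq_iff_eq, bne_iff_ne, ne_eq,
    PySem.Int.mod_eq_zero_iff_dvd]
  exact ⟨h3, h0⟩

theorem pvCondFalse (p : Int) (h : ¬ (3 : Int) ∣ p) :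
    (PySem.Int.mod p 3 == 0 && p != 0) = false := by
  simp only [Bool.and_eq_false_iff, beq_eq_false_iff_ne, ne_eq,
    PySem.Int.mod_eq_zero_iff_dvd]
  exact Or.inl h

theorem foldl_fA (l : List Char) (p : Int) (acc : List Char) :
    l.foldl
      (fun (st : Int × List Char) numero =>
        if PySem.Int.mod st.1 3 == 0 && st.1 != 0 then (st.1 + 1, st.2 ++ [','] ++ [numero])
        else (st.1 + 1, st.2 ++ [numero]))
      (p, acc)
    = (p + l.length, acc ++ fA l p) := by
  induction l generalizing p acc with
  | nil => simp [fA]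
  | cons c cs ih =>
    simp only [List.foldl_cons, fA]
    by_cases h : (PySem.Int.mod p 3 == 0 && p != 0) = true
    · rw [if_pos h, ih, if_pos h]
      simp only [List.length_cons, Prod.mk.injEq]
      constructor
      · push_cast; ring
      · simp
    · rw [if_neg h, ih, if_neg h]
      simp only [List.length_cons, Prod.mk.injEq]
      constructor
      · push_cast; ring
      · simp

theorem join_comma (ch : List Char) (chs : List (List Char)) :
    PySem.Chars.join [','] (ch :: chs) = ch ++ chs.flatMap (fun c => ',' :: c) := by
  induction chs generalizing ch with
  | nil => simp [PySem.Chars.join_singleton]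
  | cons q rest ih =>
    rw [PySem.Chars.join_cons_cons, ih]
    simp

theorem fA_shift (l : List Char) : ∀ (k : Nat),
    fA l (3 * ((k : Int) + 1)) = (chunks3 l).flatMap (fun c => ',' :: c) := by
  induction l using chunks3.induct with
  | case1 => intro k; simp [fA, chunks3]
  | case2 a rest ih =>
    intro k
    match rest with
    | [] =>
      simp only [fA, chunks3, List.take_nil, List.drop_nil]
      rw [pvCondTrue _ ⟨(k : Int) + 1, rfl⟩ (by omega)]
      simp
    | [b] =>
      simp only [fA, chunks3]
      rw [pvCondTrue _ ⟨(k : Int) + 1, rfl⟩ (by omega),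
        pvCondFalse _ (by omega)]
      simp [chunks3_nil]
    | b :: c :: r =>
      simp only [fA, chunks3]
      rw [pvCondTrue _ ⟨(k : Int) + 1, rfl⟩ (by omega),
        pvCondFalse _ (by omega), pvCondFalse _ (by omega)]
      have h3 : 3 * ((k : Int) + 1) + 1 + 1 + 1 = 3 * (((k + 1 : Nat) : Int) + 1) := by
        push_cast; ring
      have ih' := ih (k + 1)
      simp only [List.drop_succ_cons, List.drop_zero] at ih'
      rw [h3, ih']
      simp

theorem fA_zero (l : List Char) :
    fA l 0 = PySem.Chars.join [','] (chunks3 l) := by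
  match l with
  | [] => simp [fA, chunks3, PySem.Chars.join_nil]
  | [a] =>
    simp only [fA, chunks3, List.take_nil, List.drop_nil]
    rw [show (PySem.Int.mod 0 3 == 0 && (0 : Int) != 0) = false from by decide]
    simp [PySem.Chars.join_singleton]
  | [a, b] =>
    simp only [fA, chunks3]
    rw [show (PySem.Int.mod 0 3 == 0 && (0 : Int) != 0) = false from by decide,
      pvCondFalse (0+1) (by decide)]
    simp [chunks3_nil, PySem.Chars.join_singleton]
  | a :: b :: c :: r =>
    simp only [fA, chunks3]
    rw [show (PySem.Int.mod 0 3 == 0 && (0 : Int) != 0) = false from by decide,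
      pvCondFalse (0+1) (by decide), pvCondFalse (0+1+1) (by decide)]
    have h3 : (0 : Int) + 1 + 1 + 1 = 3 * (((0 : Nat) : Int) + 1) := by norm_num
    rw [h3, fA_shift r 0, join_comma]
    simp

theorem range_chunks (l : List Char) :
    (List.range ((l.length + 2) / 3)).map (fun k => (l.drop (3 * k)).take 3) = chunks3 l := by
  induction l using chunks3.induct with
  | case1 => simp [chunks3]
  | case2 a rest ih =>
    have hm : ((a :: rest).length + 2) / 3 = ((rest.length - 2) + 2) / 3 + 1 := by
      simp only [List.length_cons]; omega
    rw [hm, List.range_succ_eq_map, List.map_cons, List.map_map]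
    simp only [chunks3]
    congr 1
    simp only [List.length_drop] at ih
    rw [← ih]
    apply List.map_congr_left
    intro k hk
    have h1 : 3 * Nat.succ k = 3 * k + 2 + 1 := by omega
    simp only [Function.comp_apply, h1, List.drop_succ_cons, List.drop_drop]
    try (congr 2; omega)

theorem slice3 (s : List Char) (k : Nat) :
    PySem.List.slice s (some (0 + 3 * (k : Int))) (some (0 + 3 * (k : Int) + 3))
      = (s.drop (3 * k)).take 3 := by
  rw [PySem.List.slice_toNat]
  have h1 : ((0 : Int) + 3 * (k : Int)).toNat = 3 * k := by omega
  have h2 : ((0 : Int) + 3 * (k : Int) + 3).toNat = 3 * k + 3 := by omega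
  rw [h1, h2]
  have h3 : 3 * k + 3 - 3 * k = 3 := by omega
  rw [h3]
  all_goals omega

theorem a_eq (n : Int) :
    group_by_commas n
      = String.ofList ((fA ((PySem.Int.toChars n).reverse) 0).reverse) := by
  unfold group_by_commas
  rw [PySem.List.slice?_none_none_neg_one]
  simp only [Option.getD_some]
  rw [foldl_fA]
  rw [PySem.List.slice?_none_none_neg_one]
  simp

theorem alt_eq (n : Int) :
    group_by_commas_alt n
      = String.ofList ((PySem.Chars.join [','] (chunks3 ((PySem.Int.toChars n).reverse))).reverse) := by
  unfold group_by_commas_alt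
  rw [PySem.List.slice?_none_none_neg_one]
  simp only [Option.getD_some, PySem.List.len_eq]
  rw [PySem.List.pyRange_of_pos 0 _ (by norm_num : (0 : Int) < 3)]
  have hcnt :
      (if (0 : Int) < ((PySem.Int.toChars n).reverse.length : Int)
        then ((((PySem.Int.toChars n).reverse.length : Int) - 0 + 3 - 1) / 3).toNat else 0)
      = ((PySem.Int.toChars n).reverse.length + 2) / 3 := by
    split <;> omega
  rw [hcnt, List.map_map]
  have hmap :
      ((fun i => PySem.List.slice ((PySem.Int.toChars n).reverse) (some i) (some (i + 3))) ∘
        fun k : Nat => (0 : Int) + 3 * (k : Int))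
      = fun k : Nat => (((PySem.Int.toChars n).reverse.drop (3 * k)).take 3) := by
    funext k
    exact slice3 _ k
  rw [hmap, range_chunks]
  rw [PySem.List.slice?_none_none_neg_one]
  simp

-- ===== VERDICT (by name: the statement is the Claim_ definition above) =====
theorem group_by_commas_spec : Claim_equal_group_by_commas := by
  intro n _
  unfold Spec_group_by_commas
  rw [a_eq, alt_eq, fA_zero]
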